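-- pv_equiv track=rewrite | github.com/Jap-Sidhu/Tic-tac-toe | games.py | k_in_row
-- ===== SOURCE A (Python) =====
-- def k_in_row(board, pos, player, dir, k):
--     """helpe function: Return true if there is a line of k cells in direction dir including position pos on board for player."""
--     (delta_x, delta_y) = dir
--     x, y = pos
--     n = 0  # n is number of moves in row
--     while board.get((x, y)) == player:
--         n += 1
--         x, y = x + delta_x, y + delta_y
--     x, y = pos
--     while board.get((x, y)) == player:
--         n += 1
--         x, y = x - delta_x, y - delta_y
--     n -= 1  # Because we counted move itself twice
--     return n >= k
-- ===== SOURCE B (Python) =====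
-- def k_in_row(board, pos, player, dir, k):
--     """Seek the start of the run through pos, then count it in one forward sweep."""
--     if board.get(pos) != player:
--         return 0 >= k
--     (dx, dy) = dir
--     x, y = pos
--     # walk backwards to the first cell of the run
--     while board.get((x - dx, y - dy)) == player:
--         x, y = x - dx, y - dy
--     n = 0
--     while board.get((x, y)) == player:
--         n += 1
--         x, y = x + dx, y + dy
--     return n >= k
-- ===== Notes on version B (the rewrite author's own statement) =====
-- stated objective: alternative
-- what changed: A scans outward from pos twice (forward then backward) and subtracts the double-counted pos; B guards the pos-not-player case, seeks backward to the start of the run, and counts the whole run in a single forward sweep.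
-- intended difference: When k = 0 and pos is not the player's cell, A returns False (its counter underflows to -1 so -1 >= 0 fails) while B returns True (an empty run trivially contains 0 cells in a row), which is the intended meaning of k = 0. — e.g. on k_in_row([], (0, 0), "X", (1, 0), 0): A returns false, B returns true
import Mathlib
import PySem

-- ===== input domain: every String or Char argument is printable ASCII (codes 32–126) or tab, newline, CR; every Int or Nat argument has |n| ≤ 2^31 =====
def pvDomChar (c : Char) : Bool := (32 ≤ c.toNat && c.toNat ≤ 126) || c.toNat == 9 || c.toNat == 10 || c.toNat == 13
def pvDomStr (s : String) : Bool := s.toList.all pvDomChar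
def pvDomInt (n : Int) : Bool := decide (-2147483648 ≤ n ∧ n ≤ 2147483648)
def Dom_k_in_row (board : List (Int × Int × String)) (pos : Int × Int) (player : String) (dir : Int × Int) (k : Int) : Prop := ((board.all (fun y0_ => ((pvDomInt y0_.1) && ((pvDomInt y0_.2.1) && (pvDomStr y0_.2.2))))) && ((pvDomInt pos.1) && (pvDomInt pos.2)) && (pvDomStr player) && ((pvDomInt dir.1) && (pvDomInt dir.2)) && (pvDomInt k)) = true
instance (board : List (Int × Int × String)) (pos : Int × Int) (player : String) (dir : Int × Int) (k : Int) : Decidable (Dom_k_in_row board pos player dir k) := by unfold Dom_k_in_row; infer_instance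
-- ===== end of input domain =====

-- B replaces A's two outward scans from pos by a guard + seek-to-run-start + one forward sweep ('alternative', same cost).
-- Intended difference (D_): for k = 0 with pos not the player's cell A returns false, B returns true.

-- board.get((x,y)) on the dict built from the association list: for duplicate keys the LAST
-- value wins, exactly as Python's dict(pairs); hand-ported, exact on all inputs.
def bget (board : List (Int × Int × String)) (px py : Int) : Option String :=
  match board with
  | [] => none
  | e :: t =>
      match bget t px py with
      | some s => some s
      | none => if e.1 = px ∧ e.2.1 = py then some e.2.2 else none

-- ===== PORT A =====
-- first while loop of A: while board.get((x,y)) == player: n += 1; x,y = x+dx, y+dy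
def loopFwd (board : List (Int × Int × String)) (player : String) (dx dy : Int) :
    Nat → Int → Int → Int → Int
  | 0, _, _, n => n
  | f + 1, x, y, n =>
      if bget board x y = some player then loopFwd board player dx dy f (x + dx) (y + dy) (n + 1)
      else n

-- second while loop of A: while board.get((x,y)) == player: n += 1; x,y = x-dx, y-dy
def loopBwd (board : List (Int × Int × String)) (player : String) (dx dy : Int) :
    Nat → Int → Int → Int → Int
  | 0, _, _, n => n
  | f + 1, x, y, n =>
      if bget board x y = some player then loopBwd board player dx dy f (x - dx) (y - dy) (n + 1)
      else n

def k_in_row (board : List (Int × Int × String)) (pos : Int × Int) (player : String) (dir : Int × Int) (k : Int) : Bool :=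
  -- fuel board.length + 1 suffices: each iteration after the first visits a fresh key
  let fuel := board.length + 1
  let n := loopFwd board player dir.1 dir.2 fuel pos.1 pos.2 0
  let n := loopBwd board player dir.1 dir.2 fuel pos.1 pos.2 n
  decide (n - 1 ≥ k)

-- ===== PORT B =====
-- B's seek loop: while board.get((x-dx,y-dy)) == player: x,y = x-dx, y-dy
def seekStart (board : List (Int × Int × String)) (player : String) (dx dy : Int) :
    Nat → Int → Int → Int × Int
  | 0, x, y => (x, y)
  | f + 1, x, y =>
      if bget board (x - dx) (y - dy) = some player then seekStart board player dx dy f (x - dx) (y - dy)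
      else (x, y)

-- B's sweep loop: n = 0; while board.get((x,y)) == player: n += 1; x,y = x+dx, y+dy
def sweepRun (board : List (Int × Int × String)) (player : String) (dx dy : Int) :
    Nat → Int → Int → Int → Int
  | 0, _, _, n => n
  | f + 1, x, y, n =>
      if bget board x y = some player then sweepRun board player dx dy f (x + dx) (y + dy) (n + 1)
      else n

def k_in_row_alt (board : List (Int × Int × String)) (pos : Int × Int) (player : String) (dir : Int × Int) (k : Int) : Bool :=
  if bget board pos.1 pos.2 ≠ some player then decide ((0 : Int) ≥ k)
  else
    let fuel := board.length + 1
    let s := seekStart board player dir.1 dir.2 fuel pos.1 pos.2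
    decide (sweepRun board player dir.1 dir.2 fuel s.1 s.2 0 ≥ k)

-- closed-form lookup used only by Pre_/D_: the value at key pos is that of the LAST entry of
-- board carrying this key (= what the Python dict built from the list holds), stated with
-- reverse/find? so a reader checks it without running the ports' recursion
def keyVal (board : List (Int × Int × String)) (pos : Int × Int) : Option String :=
  (board.reverse.find? (fun e => decide (e.1 = pos.1 ∧ e.2.1 = pos.2))).map (fun e => e.2.2)

-- ===== PRECONDITION & SPEC =====
-- Pre_ excludes exactly the inputs on which the Python A never returns: dir = (0,0) with pos
-- already holding the player's mark makes both of A's while-loops spin forever.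
def Pre_k_in_row (board : List (Int × Int × String)) (pos : Int × Int) (player : String) (dir : Int × Int) (k : Int) : Prop :=
  ¬ (dir = (0, 0) ∧ keyVal board pos = some player)
instance (board : List (Int × Int × String)) (pos : Int × Int) (player : String) (dir : Int × Int) (k : Int) : Decidable (Pre_k_in_row board pos player dir k) := by unfold Pre_k_in_row; infer_instance

def pvWitness_k_in_row : (List (Int × Int × String)) × (Int × Int) × String × (Int × Int) × Int :=
  ([(0, 0, "X")], (0, 0), "X", (1, 0), 1)

-- When k = 0 and pos is not the player's cell, A returns false (counter underflows to -1) while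
-- B returns true, the intended value: every position trivially has 0 cells in a row.
def D_k_in_row (board : List (Int × Int × String)) (pos : Int × Int) (player : String) (dir : Int × Int) (k : Int) : Prop :=
  k = 0 ∧ keyVal board pos ≠ some player
instance (board : List (Int × Int × String)) (pos : Int × Int) (player : String) (dir : Int × Int) (k : Int) : Decidable (D_k_in_row board pos player dir k) := by unfold D_k_in_row; infer_instance

def Spec_k_in_row (board : List (Int × Int × String)) (pos : Int × Int) (player : String) (dir : Int × Int) (k : Int) (out : Bool) : Prop := ¬ D_k_in_row board pos player dir k → out = k_in_row_alt board pos player dir k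
instance (board : List (Int × Int × String)) (pos : Int × Int) (player : String) (dir : Int × Int) (k : Int) (out : Bool) : Decidable (Spec_k_in_row board pos player dir k out) := by unfold Spec_k_in_row; infer_instance

def pvDiffWitness_k_in_row : (List (Int × Int × String)) × (Int × Int) × String × (Int × Int) × Int :=
  ([], (0, 0), "X", (1, 0), 0)
def pvDiffWitnessOut_k_in_row : Bool × Bool := (false, true)

-- ===== CLAIM (what is proved, stated in full; the proofs are below) =====
def Claim_unchanged_k_in_row : Prop := ∀ (board : List (Int × Int × String)) (pos : Int × Int) (player : String) (dir : Int × Int) (k : Int), Dom_k_in_row board pos player dir k → Pre_k_in_row board pos player dir k → Spec_k_in_row board pos player dir k (k_in_row board pos player dir k)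
def Claim_changed_k_in_row : Prop := Dom_k_in_row (pvDiffWitness_k_in_row.1) (pvDiffWitness_k_in_row.2.1) (pvDiffWitness_k_in_row.2.2.1) (pvDiffWitness_k_in_row.2.2.2.1) (pvDiffWitness_k_in_row.2.2.2.2) ∧ Pre_k_in_row (pvDiffWitness_k_in_row.1) (pvDiffWitness_k_in_row.2.1) (pvDiffWitness_k_in_row.2.2.1) (pvDiffWitness_k_in_row.2.2.2.1) (pvDiffWitness_k_in_row.2.2.2.2) ∧ D_k_in_row (pvDiffWitness_k_in_row.1) (pvDiffWitness_k_in_row.2.1) (pvDiffWitness_k_in_row.2.2.1) (pvDiffWitness_k_in_row.2.2.2.1) (pvDiffWitness_k_in_row.2.2.2.2) ∧ k_in_row (pvDiffWitness_k_in_row.1) (pvDiffWitness_k_in_row.2.1) (pvDiffWitness_k_in_row.2.2.1) (pvDiffWitness_k_in_row.2.2.2.1) (pvDiffWitness_k_in_row.2.2.2.2) = pvDiffWitnessOut_k_in_row.1 ∧ k_in_row_alt (pvDiffWitness_k_in_row.1) (pvDiffWitness_k_in_row.2.1) (pvDiffWitness_k_in_row.2.2.1) (pvDiffWitness_k_in_row.2.2.2.1)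 (pvDiffWitness_k_in_row.2.2.2.2) = pvDiffWitnessOut_k_in_row.2 ∧ pvDiffWitnessOut_k_in_row.1 ≠ pvDiffWitnessOut_k_in_row.2
def Claim_exact_k_in_row : Prop := ∀ (board : List (Int × Int × String)) (pos : Int × Int) (player : String) (dir : Int × Int) (k : Int), Dom_k_in_row board pos player dir k → Pre_k_in_row board pos player dir k → D_k_in_row board pos player dir k → k_in_row board pos player dir k ≠ k_in_row_alt board pos player dir k

-- ===== LEMMAS AND PROOFS =====

-- the ports' first-to-last overwrite lookup equals the reverse/find? formulation of Pre_/D_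
theorem bget_eq_keyVal (board : List (Int × Int × String)) (px py : Int) :
    bget board px py = keyVal board (px, py) := by
  induction board with
  | nil => rfl
  | cons e t ih =>
      simp only [keyVal, List.reverse_cons, List.find?_append] at *
      cases hf : t.reverse.find? (fun e => decide (e.1 = px ∧ e.2.1 = py)) with
      | some g =>
          rw [hf] at ih
          simp only [bget, ih]
          rfl
      | none =>
          rw [hf] at ih
          by_cases hc : e.1 = px ∧ e.2.1 = py
          · simp [bget, ih, List.find?, hc]
          · simp [bget, ih, List.find?, hc]

theorem bget_mem {board : List (Int × Int × String)} {px py : Int} {s : String}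
    (h : bget board px py = some s) : (px, py) ∈ board.map (fun e => (e.1, e.2.1)) := by
  induction board with
  | nil => simp [bget] at h
  | cons e t ih =>
      simp only [List.map_cons, List.mem_cons]
      cases hb : bget t px py with
      | some s' =>
          simp only [bget, hb, Option.some.injEq] at h
          exact Or.inr (ih (by rw [hb, h]))
      | none =>
          simp only [bget, hb] at h
          split_ifs at h with hc
          exact Or.inl (by rw [hc.1, hc.2])

-- proof-side pure count of consecutive matching cells from (x,y) along (dx,dy), fuel-bounded
def cnt (board : List (Int × Int × String)) (player : String) (dx dy : Int) :
    Nat → Int → Int → Nat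
  | 0, _, _ => 0
  | f + 1, x, y =>
      if bget board x y = some player then cnt board player dx dy f (x + dx) (y + dy) + 1
      else 0

theorem cnt_matches {board : List (Int × Int × String)} {player : String} {dx dy : Int} :
    ∀ (f : Nat) (x y : Int) (i : Nat), i < cnt board player dx dy f x y →
      bget board (x + i * dx) (y + i * dy) = some player := by
  intro f
  induction f with
  | zero => intro x y i h; simp [cnt] at h
  | succ f ih =>
      intro x y i h
      simp only [cnt] at h
      split_ifs at h with hm
      · cases i with
        | zero => simpa using hm
        | succ i =>
            have := ih (x + dx) (y + dy) i (by omega)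
            have hx : x + dx + i * dx = x + (i + 1 : Nat) * dx := by push_cast; ring
            have hy : y + dy + i * dy = y + (i + 1 : Nat) * dy := by push_cast; ring
            rwa [hx, hy] at this
      · omega

theorem pigeonhole {board : List (Int × Int × String)} {player : String} {dx dy : Int}
    (hd : ¬(dx = 0 ∧ dy = 0)) {x y : Int} {c : Nat}
    (h : ∀ i : Nat, i < c → bget board (x + i * dx) (y + i * dy) = some player) :
    c ≤ board.length := by
  classical
  set f : Nat → Int × Int := fun i => (x + i * dx, y + i * dy) with hf
  have hinj : Set.InjOn f (Finset.range c) := by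
    intro i _ j _ hij
    simp only [hf, Prod.mk.injEq] at hij
    obtain ⟨h1, h2⟩ := hij
    have hx' : (i : Int) * dx = j * dx := by omega
    have hy' : (i : Int) * dy = j * dy := by omega
    rcases not_and_or.mp hd with hdx | hdy
    · exact_mod_cast mul_right_cancel₀ hdx hx'
    · exact_mod_cast mul_right_cancel₀ hdy hy'
  have hsub : (Finset.range c).image f ⊆ (board.map (fun e => (e.1, e.2.1))).toFinset := by
    intro q hq
    simp only [Finset.mem_image, Finset.mem_range] at hq
    obtain ⟨i, hi, rfl⟩ := hq
    exact List.mem_toFinset.mpr (bget_mem (h i hi))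
  have hcard : ((Finset.range c).image f).card = c := by
    rw [Finset.card_image_of_injOn (by simpa using hinj), Finset.card_range]
  have := Finset.card_le_card hsub
  rw [hcard] at this
  calc c ≤ (board.map (fun e => (e.1, e.2.1))).toFinset.card := this
    _ ≤ (board.map (fun e => (e.1, e.2.1))).length := List.toFinset_card_le _
    _ = board.length := List.length_map ..

theorem cnt_le {board : List (Int × Int × String)} {player : String} {dx dy : Int}
    (hd : ¬(dx = 0 ∧ dy = 0)) (f : Nat) (x y : Int) :
    cnt board player dx dy f x y ≤ board.length :=
  pigeonhole hd (fun i hi => cnt_matches f x y i hi)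

theorem cnt_stable {board : List (Int × Int × String)} {player : String} {dx dy : Int} :
    ∀ (f g : Nat) (x y : Int), cnt board player dx dy f x y < f →
      cnt board player dx dy (f + g) x y = cnt board player dx dy f x y := by
  intro f
  induction f with
  | zero => intro g x y h; omega
  | succ f ih =>
      intro g x y h
      have hfg : f + 1 + g = (f + g) + 1 := by omega
      rw [hfg]
      simp only [cnt] at h ⊢
      split_ifs with hm
      · simp only [hm, if_true] at h
        rw [ih g (x + dx) (y + dy) (by omega)]
      · rfl

-- with enough fuel a leading match just shifts the count by one
theorem cnt_step {board : List (Int × Int × String)} {player : String} {dx dy : Int}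
    (hd : ¬(dx = 0 ∧ dy = 0)) {x y : Int} (hm : bget board x y = some player) :
    cnt board player dx dy (board.length + 1) x y
      = cnt board player dx dy (board.length + 1) (x + dx) (y + dy) + 1 := by
  set L := board.length with hL
  have hlt : cnt board player dx dy L (x + dx) (y + dy) < L := by
    rcases lt_or_eq_of_le (cnt_le hd L (x + dx) (y + dy)) with h | h
    · exact h
    · exfalso
      have hall : ∀ i : Nat, i < L + 1 → bget board (x + i * dx) (y + i * dy) = some player := by
        intro i hi
        cases i with
        | zero => simpa using hm
        | succ i =>
            have := cnt_matches (board := board) (player := player) (dx := dx) (dy := dy)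
              L (x + dx) (y + dy) i (by omega)
            have hx : x + dx + i * dx = x + (i + 1 : Nat) * dx := by push_cast; ring
            have hy : y + dy + i * dy = y + (i + 1 : Nat) * dy := by push_cast; ring
            rwa [hx, hy] at this
      have := pigeonhole hd hall
      omega
  have hstep : cnt board player dx dy (L + 1) x y
      = cnt board player dx dy L (x + dx) (y + dy) + 1 := by
    simp only [cnt, hm, if_true]
  rw [hstep, cnt_stable L 1 (x + dx) (y + dy) hlt]

-- walking j matching cells back from (x,y) adds j to the forward count
theorem cnt_run_desc {board : List (Int × Int × String)} {player : String} {dx dy : Int}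
    (hd : ¬(dx = 0 ∧ dy = 0)) {x y : Int} :
    ∀ j : Nat, (∀ i : Nat, i ≤ j → bget board (x - i * dx) (y - i * dy) = some player) →
      cnt board player dx dy (board.length + 1) (x - j * dx) (y - j * dy)
        = j + cnt board player dx dy (board.length + 1) x y := by
  intro j
  induction j with
  | zero => intro _; simp
  | succ j ih =>
      intro hall
      have hm : bget board (x - (j + 1 : Nat) * dx) (y - (j + 1 : Nat) * dy) = some player :=
        hall (j + 1) le_rfl
      have hstep := cnt_step hd hm
      have hx : x - (j + 1 : Nat) * dx + dx = x - j * dx := by push_cast; ring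
      have hy : y - (j + 1 : Nat) * dy + dy = y - j * dy := by push_cast; ring
      rw [hx, hy] at hstep
      rw [hstep, ih (fun i hi => hall i (by omega))]
      omega

-- the seek loop lands (bcnt - 1) steps back, where bcnt is the backward-inclusive count
theorem seek_char {board : List (Int × Int × String)} {player : String} {dx dy : Int} :
    ∀ (f : Nat) (x y : Int), bget board x y = some player →
      cnt board player (-dx) (-dy) (f + 1) x y ≤ f →
      seekStart board player dx dy (f + 1) x y
        = (x - (cnt board player (-dx) (-dy) (f + 1) x y - 1 : Nat) * dx,
           y - (cnt board player (-dx) (-dy) (f + 1) x y - 1 : Nat) * dy) := by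
  intro f
  induction f with
  | zero =>
      intro x y hm hle
      exfalso; simp only [cnt, hm, if_true] at hle; omega
  | succ f ih =>
      intro x y hm hle
      have hx : x - dx = x + -dx := by ring
      have hy : y - dy = y + -dy := by ring
      by_cases hprev : bget board (x + -dx) (y + -dy) = some player
      · have hprev2 : bget board (x - dx) (y - dy) = some player := by
          rw [hx, hy]; exact hprev
        have hbc : cnt board player (-dx) (-dy) (f + 1 + 1) x y
            = cnt board player (-dx) (-dy) (f + 1) (x + -dx) (y + -dy) + 1 := by
          simp only [cnt, hm, if_true]
        have hpos : 1 ≤ cnt board player (-dx) (-dy) (f + 1) (x + -dx) (y + -dy) := by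
          simp only [cnt, hprev, if_true]; omega
        have hle' : cnt board player (-dx) (-dy) (f + 1) (x + -dx) (y + -dy) ≤ f := by
          omega
        have hseek2 : seekStart board player dx dy (f + 1 + 1) x y
            = seekStart board player dx dy (f + 1) (x - dx) (y - dy) := by
          simp only [seekStart, hprev2, if_true]
        have hrec := ih (x - dx) (y - dy) hprev2 (by rw [hx, hy]; exact hle')
        rw [hx, hy] at hrec
        rw [hseek2, hx, hy, hrec, hbc]
        have hcast : ((cnt board player (-dx) (-dy) (f + 1) (x + -dx) (y + -dy) - 1 : Nat) : Int)
            = (cnt board player (-dx) (-dy) (f + 1) (x + -dx) (y + -dy) : Int) - 1 := by omega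
        have hcast2 : ((cnt board player (-dx) (-dy) (f + 1) (x + -dx) (y + -dy) + 1 - 1 : Nat) : Int)
            = (cnt board player (-dx) (-dy) (f + 1) (x + -dx) (y + -dy) : Int) := by omega
        simp only [Prod.mk.injEq, hcast, hcast2]
        constructor <;> ring
      · have hprev2 : ¬ bget board (x - dx) (y - dy) = some player := by
          rw [hx, hy]; exact hprev
        have hseek2 : seekStart board player dx dy (f + 1 + 1) x y = (x, y) := by
          simp only [seekStart, hprev2, if_false]
        have hbc : cnt board player (-dx) (-dy) (f + 1 + 1) x y = 1 := by
          simp only [cnt, hm, if_true, hprev, if_false]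
        rw [hseek2, hbc]
        simp

-- bridges between the ports' accumulator loops and the pure count
theorem loopFwd_eq_cnt {board : List (Int × Int × String)} {player : String} {dx dy : Int} :
    ∀ (f : Nat) (x y : Int) (n : Int),
      loopFwd board player dx dy f x y n = n + cnt board player dx dy f x y := by
  intro f
  induction f with
  | zero => intro x y n; simp [loopFwd, cnt]
  | succ f ih =>
      intro x y n
      simp only [loopFwd, cnt]
      split_ifs with hm
      · rw [ih]; push_cast; ring
      · simp

theorem loopBwd_eq_cnt {board : List (Int × Int × String)} {player : String} {dx dy : Int} :
    ∀ (f : Nat) (x y : Int) (n : Int),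
      loopBwd board player dx dy f x y n = n + cnt board player (-dx) (-dy) f x y := by
  intro f
  induction f with
  | zero => intro x y n; simp [loopBwd, cnt]
  | succ f ih =>
      intro x y n
      simp only [loopBwd, cnt]
      split_ifs with hm
      · rw [ih]
        have hx : x - dx = x + -dx := by ring
        have hy : y - dy = y + -dy := by ring
        rw [hx, hy]; push_cast; ring
      · simp

theorem sweepRun_eq_cnt {board : List (Int × Int × String)} {player : String} {dx dy : Int} :
    ∀ (f : Nat) (x y : Int) (n : Int),
      sweepRun board player dx dy f x y n = n + cnt board player dx dy f x y := by
  intro f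
  induction f with
  | zero => intro x y n; simp [sweepRun, cnt]
  | succ f ih =>
      intro x y n
      simp only [sweepRun, cnt]
      split_ifs with hm
      · rw [ih]; push_cast; ring
      · simp

-- ===== VERDICT (by name: the statement is the Claim_ definition above) =====
theorem k_in_row_spec : Claim_unchanged_k_in_row := by
  intro board pos player dir k _ hpre hnd
  obtain ⟨px, py⟩ := pos
  obtain ⟨dx, dy⟩ := dir
  set L := board.length with hL
  by_cases hm : bget board px py = some player
  · -- pos matches: dir ≠ (0,0) by Pre, both sides count the full run
    have hd : ¬(dx = 0 ∧ dy = 0) := by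
      intro ⟨h1, h2⟩
      exact hpre ⟨by simp [h1, h2], by rw [← bget_eq_keyVal]; exact hm⟩
    have hd' : ¬(-dx = 0 ∧ -dy = 0) := by omega
    set F := cnt board player dx dy (L + 1) px py with hF
    set B := cnt board player (-dx) (-dy) (L + 1) px py with hB
    have hBle : B ≤ L := cnt_le hd' (L + 1) px py
    have hBpos : 1 ≤ B := by
      cases hc : B with
      | zero => exfalso; rw [hB] at hc; simp only [cnt, hm, if_true] at hc; omega
      | succ n => omega
    -- A's value
    have hA : k_in_row board (px, py) player (dx, dy) k
        = decide ((F : Int) + B - 1 ≥ k) := by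
      simp only [k_in_row, loopFwd_eq_cnt, loopBwd_eq_cnt, ← hL, ← hF, ← hB]
      norm_num
    -- B's value
    have hseek := seek_char (board := board) (player := player) (dx := dx) (dy := dy)
      L px py hm (by rw [← hB]; omega)
    rw [← hB] at hseek
    have hrun : ∀ i : Nat, i ≤ B - 1 →
        bget board (px - i * dx) (py - i * dy) = some player := by
      intro i hi
      have := cnt_matches (board := board) (player := player) (dx := -dx) (dy := -dy)
        (L + 1) px py i (by omega)
      have hx : px + i * -dx = px - i * dx := by ring
      have hy : py + i * -dy = py - i * dy := by ring
      rwa [hx, hy] at this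
    have hsweep : cnt board player dx dy (L + 1) (px - (B - 1 : Nat) * dx) (py - (B - 1 : Nat) * dy)
        = (B - 1) + F := cnt_run_desc hd (B - 1) hrun
    have hAlt : k_in_row_alt board (px, py) player (dx, dy) k
        = decide (((B - 1 + F : Nat) : Int) ≥ k) := by
      simp only [k_in_row_alt]
      split_ifs with h
      · exact absurd hm h
      · simp only [← hL, hseek, sweepRun_eq_cnt, hsweep]
        push_cast
        norm_num
    rw [hA, hAlt]
    apply decide_eq_decide.mpr
    omega
  · -- pos does not match: A gives -1 ≥ k, B gives 0 ≥ k, k ≠ 0 by ¬D_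
    have hk : k ≠ 0 := by
      intro hk0; exact hnd ⟨hk0, by rw [← bget_eq_keyVal]; exact hm⟩
    have hA : k_in_row board (px, py) player (dx, dy) k = decide ((-1 : Int) ≥ k) := by
      simp only [k_in_row, loopFwd, loopBwd, hm, if_false]
      norm_num
    have hAlt : k_in_row_alt board (px, py) player (dx, dy) k = decide ((0 : Int) ≥ k) := by
      simp only [k_in_row_alt]
      split_ifs with h
      · rfl
      · simp only [not_not] at h; exact absurd h hm
    rw [hA, hAlt]
    apply decide_eq_decide.mpr
    omega

theorem k_in_row_changed : Claim_changed_k_in_row := by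
  unfold Claim_changed_k_in_row; decide

theorem k_in_row_tight : Claim_exact_k_in_row := by
  intro board pos player dir k _ _ hd
  obtain ⟨hk, hm0⟩ := hd
  obtain ⟨px, py⟩ := pos
  obtain ⟨dx, dy⟩ := dir
  have hm : ¬ bget board px py = some player := by
    rw [bget_eq_keyVal]; exact hm0
  have hA : k_in_row board (px, py) player (dx, dy) k = false := by
    simp only [k_in_row, loopFwd, loopBwd, hm, if_false]
    subst hk; norm_num
  have hAlt : k_in_row_alt board (px, py) player (dx, dy) k = true := by
    simp only [k_in_row_alt]
    split_ifs with h
    · subst hk; decide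
    · simp only [not_not] at h; exact absurd h hm
  rw [hA, hAlt]; simp
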